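-- pv_equiv track=rewrite | github.com/TeiNam/oracle-migration-analyzer | src/oracle_complexity_analyzer.py | _is_plsql
-- ===== SOURCE A (Python) =====
-- def _is_plsql(content: str) -> bool:
--     """PL/SQL 여부 판단
--
--     코드 내용을 분석하여 PL/SQL 오브젝트인지 판단합니다.
--
--     Args:
--         content: 분석할 코드 내용
--
--     Returns:
--         bool: PL/SQL이면 True, SQL이면 False
--     """
--     # PL/SQL 키워드 목록
--     plsql_keywords = [
--         'CREATE OR REPLACE PACKAGE',
--         'CREATE PACKAGE',
--         'CREATE OR REPLACE PROCEDURE',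
--         'CREATE PROCEDURE',
--         'CREATE OR REPLACE FUNCTION',
--         'CREATE FUNCTION',
--         'CREATE OR REPLACE TRIGGER',
--         'CREATE TRIGGER',
--         'CREATE MATERIALIZED VIEW',
--         'CREATE OR REPLACE VIEW',
--         'CREATE VIEW',
--         'DECLARE',
--         'BEGIN',
--         'EXCEPTION',
--     ]
--
--     upper_content = content.upper()
--
--     # PL/SQL 키워드가 있으면 PL/SQL로 판단
--     return any(kw in upper_content for kw in plsql_keywords)
-- ===== SOURCE B (Python) =====
-- # Position-major single scan with first-character dispatch instead of one
-- # independent substring search per keyword.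
--
-- _PLSQL_BY_FIRST = {
--     'C': (
--         'CREATE OR REPLACE PACKAGE',
--         'CREATE PACKAGE',
--         'CREATE OR REPLACE PROCEDURE',
--         'CREATE PROCEDURE',
--         'CREATE OR REPLACE FUNCTION',
--         'CREATE FUNCTION',
--         'CREATE OR REPLACE TRIGGER',
--         'CREATE TRIGGER',
--         'CREATE MATERIALIZED VIEW',
--         'CREATE OR REPLACE VIEW',
--         'CREATE VIEW',
--     ),
--     'D': ('DECLARE',),
--     'B': ('BEGIN',),
--     'E': ('EXCEPTION',),
-- }
--
--
-- def _is_plsql(content: str) -> bool: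
--     upper = content.upper()
--     for i, ch in enumerate(upper):
--         for kw in _PLSQL_BY_FIRST.get(ch, ()):
--             if upper.startswith(kw, i):
--                 return True
--     return False
-- ===== Notes on version B (the rewrite author's own statement) =====
-- stated objective: alternative
-- what changed: Keyword-major membership tests ('kw in upper' once per keyword) replaced by a single position-major left-to-right scan over the uppercased content that dispatches on the first character to a bucket of candidate keywords and tests each with startswith at that position.
import Mathlib
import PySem

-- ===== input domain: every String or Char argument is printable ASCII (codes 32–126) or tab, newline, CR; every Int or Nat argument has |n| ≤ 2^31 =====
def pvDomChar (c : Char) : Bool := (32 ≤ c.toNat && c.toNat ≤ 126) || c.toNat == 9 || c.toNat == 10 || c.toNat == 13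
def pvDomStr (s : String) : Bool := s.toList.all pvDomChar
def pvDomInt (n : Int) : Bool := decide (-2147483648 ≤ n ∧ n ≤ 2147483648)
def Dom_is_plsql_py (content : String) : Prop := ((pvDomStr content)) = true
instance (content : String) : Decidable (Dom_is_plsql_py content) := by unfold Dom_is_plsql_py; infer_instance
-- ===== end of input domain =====

-- B replaces A's one-independent-substring-search-per-keyword with a single
-- position-major scan dispatching on the first character (alternative, not faster).

-- ===== PORT A =====
def pvKeywords : List String := [
  "CREATE OR REPLACE PACKAGE",
  "CREATE PACKAGE",
  "CREATE OR REPLACE PROCEDURE",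
  "CREATE PROCEDURE",
  "CREATE OR REPLACE FUNCTION",
  "CREATE FUNCTION",
  "CREATE OR REPLACE TRIGGER",
  "CREATE TRIGGER",
  "CREATE MATERIALIZED VIEW",
  "CREATE OR REPLACE VIEW",
  "CREATE VIEW",
  "DECLARE",
  "BEGIN",
  "EXCEPTION"]

def is_plsql_py (content : String) : Bool :=
  let upper_content := PySem.Str.upper content
  pvKeywords.any (fun kw => PySem.Str.isIn kw upper_content)

-- ===== PORT B =====
-- _PLSQL_BY_FIRST.get(ch, ()) as a first-character dispatch function
def pvBucket (c : Char) : List (List Char) :=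
  if c = 'C' then [
    "CREATE OR REPLACE PACKAGE".toList,
    "CREATE PACKAGE".toList,
    "CREATE OR REPLACE PROCEDURE".toList,
    "CREATE PROCEDURE".toList,
    "CREATE OR REPLACE FUNCTION".toList,
    "CREATE FUNCTION".toList,
    "CREATE OR REPLACE TRIGGER".toList,
    "CREATE TRIGGER".toList,
    "CREATE MATERIALIZED VIEW".toList,
    "CREATE OR REPLACE VIEW".toList,
    "CREATE VIEW".toList]
  else if c = 'D' then ["DECLARE".toList]
  else if c = 'B' then ["BEGIN".toList]
  else if c = 'E' then ["EXCEPTION".toList]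
  else []

-- the loop over i: each step looks at the suffix starting at i;
-- upper.startswith(kw, i) is kw.isPrefixOf (that suffix)
def pvScan : List Char → Bool
  | [] => false
  | c :: rest => (pvBucket c).any (fun kw => kw.isPrefixOf (c :: rest)) || pvScan rest

def is_plsql_py_alt (content : String) : Bool :=
  pvScan (PySem.Str.upper content).toList

-- ===== PRECONDITION & SPEC =====
def Spec_is_plsql_py (content : String) (out : Bool) : Prop := out = is_plsql_py_alt content
instance (content : String) (out : Bool) : Decidable (Spec_is_plsql_py content out) := by unfold Spec_is_plsql_py; infer_instance

-- ===== CLAIM (what is proved, stated in full; the proofs are below) =====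
def Claim_equal_is_plsql_py : Prop := ∀ (content : String), Dom_is_plsql_py content → Spec_is_plsql_py content (is_plsql_py content)

-- ===== LEMMAS AND PROOFS =====

-- the bucket for c holds exactly the keywords whose prefix test at a position
-- starting with c can succeed
lemma pvBucket_eq (c : Char) (rest : List Char) :
    (pvBucket c).any (fun kw => kw.isPrefixOf (c :: rest)) =
    pvKeywords.any (fun kw => kw.toList.isPrefixOf (c :: rest)) := by
  by_cases h1 : c = 'C'
  · subst h1; simp [pvBucket, pvKeywords, List.isPrefixOf]
  · by_cases h2 : c = 'D'
    · subst h2; simp [pvBucket, pvKeywords, List.isPrefixOf]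
    · by_cases h3 : c = 'B'
      · subst h3; simp [pvBucket, pvKeywords, List.isPrefixOf]
      · by_cases h4 : c = 'E'
        · subst h4; simp [pvBucket, pvKeywords, List.isPrefixOf]
        · simp [pvBucket, pvKeywords, List.isPrefixOf, h1, h2, h3, h4,
            Ne.symm h1, Ne.symm h2, Ne.symm h3, Ne.symm h4]

lemma pvScan_eq (u : List Char) :
    pvScan u = pvKeywords.any (fun kw => PySem.Chars.isIn kw.toList u) := by
  induction u with
  | nil =>
    simp only [pvScan]
    decide
  | cons c rest ih =>
    rw [pvScan, pvBucket_eq, ih, Bool.eq_iff_iff]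
    simp only [Bool.or_eq_true, List.any_eq_true, List.isPrefixOf_iff_prefix,
      PySem.Chars.isIn_iff_infix, List.infix_cons_iff]
    constructor
    · rintro (⟨kw, hm, hp⟩ | ⟨kw, hm, hi⟩)
      · exact ⟨kw, hm, Or.inl hp⟩
      · exact ⟨kw, hm, Or.inr hi⟩
    · rintro ⟨kw, hm, hp | hi⟩
      · exact Or.inl ⟨kw, hm, hp⟩
      · exact Or.inr ⟨kw, hm, hi⟩

-- ===== VERDICT (by name: the statement is the Claim_ definition above) =====
theorem is_plsql_py_spec : Claim_equal_is_plsql_py := by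
  intro content _
  unfold Spec_is_plsql_py is_plsql_py is_plsql_py_alt
  rw [pvScan_eq]
  simp [PySem.Str.isIn]
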